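-- pv_equiv track=rewrite | github.com/mmwitters/euler_solutions | problem11.py | ascending_diagonal
-- ===== SOURCE A (Python) =====
-- def ascending_diagonal(matrix):
--     largest_product = 0
--
--     height = len(matrix)
--     width = len(matrix[0])
--     for row in range(height - 3):
--         for col in range(3, width):
--             current_product = matrix[row][col] \
--                               * matrix[row + 1][col - 1] \
--                               * matrix[row + 2][col - 2] \
--                               * matrix[row + 3][col - 3]
--             if current_product > largest_product:
--                 largest_product = current_product
--     return largest_product
-- ===== SOURCE B (Python) =====
-- def ascending_diagonal(matrix):
--     height = len(matrix)
--     width = len(matrix[0])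
--     best = 0
--     starts = [(0, c) for c in range(width)] + [(r, width - 1) for r in range(1, height)]
--     for r0, c0 in starts:
--         diag = []
--         r, c = r0, c0
--         while r < height and 0 <= c < len(matrix[r]):
--             diag.append(matrix[r][c])
--             r += 1
--             c -= 1
--         for i in range(len(diag) - 3):
--             p = diag[i] * diag[i + 1] * diag[i + 2] * diag[i + 3]
--             if p > best:
--                 best = p
--     return best
-- ===== Notes on version B (the rewrite author's own statement) =====
-- stated objective: alternative
-- what changed: B first extracts each ascending diagonal explicitly (walking down-left from every top-row cell and every right-column cell while in bounds) and then slides a 4-wide window over each diagonal, instead of A's nested row-by-column index scan with hard-coded offsets.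
import Mathlib
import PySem

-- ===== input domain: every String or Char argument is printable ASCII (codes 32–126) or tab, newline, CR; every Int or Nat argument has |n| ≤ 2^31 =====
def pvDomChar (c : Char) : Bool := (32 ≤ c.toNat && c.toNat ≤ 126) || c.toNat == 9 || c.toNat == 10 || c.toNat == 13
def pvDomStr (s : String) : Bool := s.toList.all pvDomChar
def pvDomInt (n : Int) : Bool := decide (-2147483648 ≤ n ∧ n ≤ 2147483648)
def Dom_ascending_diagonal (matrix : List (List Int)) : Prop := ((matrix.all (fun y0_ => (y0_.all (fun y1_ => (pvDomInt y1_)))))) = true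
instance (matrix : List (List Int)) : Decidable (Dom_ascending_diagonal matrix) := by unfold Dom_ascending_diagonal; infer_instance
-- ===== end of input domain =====

-- B replaces A's nested row×column index scan by explicit extraction of each ascending
-- diagonal (starting from the top row and the right column, walking down-left while in
-- bounds) followed by a sliding 4-window maximum: an alternative decomposition of the same work.

-- ===== PORT A =====
-- Python's matrix[r][c] (both programs index cells this way; in range wherever they read on Pre_)
def pvGet (m : List (List Int)) (r c : Int) : Int :=
  PySem.List.pyGetD (PySem.List.pyGetD m r []) c 0

def ascending_diagonal (matrix : List (List Int)) : Int :=
  let height : Int := matrix.length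
  let width : Int := ((PySem.List.pyGetD matrix 0 []).length : Int)
  (PySem.List.pyRange 0 (height - 3) 1).foldl (fun largest row =>
    (PySem.List.pyRange 3 width 1).foldl (fun largest col =>
      let current := pvGet matrix row col * pvGet matrix (row + 1) (col - 1) *
        pvGet matrix (row + 2) (col - 2) * pvGet matrix (row + 3) (col - 3)
      if current > largest then current else largest) largest) 0

-- ===== PORT B =====
-- the 'while r < height and 0 <= c < len(matrix[r]): diag.append(matrix[r][c])' walk of Source B,
-- with structural fuel = the loop's iteration bound (height - r), so the kernel can evaluate it
def pvDiagAux (m : List (List Int)) (height : Int) : Int → Int → Nat → List Int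
  | _, _, 0 => []
  | r, c, Nat.succ n =>
    if r < height ∧ 0 ≤ c ∧ c < ((PySem.List.pyGetD m r []).length : Int) then
      pvGet m r c :: pvDiagAux m height (r + 1) (c - 1) n
    else []

def pvDiag (m : List (List Int)) (height : Int) (r c : Int) : List Int :=
  pvDiagAux m height r c (height - r).toNat

def ascending_diagonal_alt (matrix : List (List Int)) : Int :=
  let height : Int := matrix.length
  let width : Int := ((PySem.List.pyGetD matrix 0 []).length : Int)
  let starts : List (Int × Int) :=
    (PySem.List.pyRange 0 width 1).map (fun c => ((0 : Int), c)) ++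
    (PySem.List.pyRange 1 height 1).map (fun r => (r, width - 1))
  starts.foldl (fun best rc =>
    let diag := pvDiag matrix height rc.1 rc.2
    (PySem.List.pyRange 0 ((diag.length : Int) - 3) 1).foldl (fun best i =>
      let p := PySem.List.pyGetD diag i 0 * PySem.List.pyGetD diag (i + 1) 0 *
        PySem.List.pyGetD diag (i + 2) 0 * PySem.List.pyGetD diag (i + 3) 0
      if p > best then p else best) best) 0

-- ===== PRECONDITION & SPEC =====
-- Pre_ is exactly the inputs on which Python A returns: a nonempty matrix whose rows are long
-- enough for every cell A's loops index — when there are ≥ 4 rows and the first row has width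
-- w ≥ 4, row r must have at least w - max(0, r - height + 4) entries; elsewhere A raises
-- IndexError (B's bounds-checked diagonal walk raises only on the empty matrix).
def Pre_ascending_diagonal (matrix : List (List Int)) : Prop :=
  matrix ≠ [] ∧ (4 ≤ (matrix.length : Int) ∧ 4 ≤ ((matrix.headI).length : Int) →
    ∀ p ∈ matrix.zipIdx, ((matrix.headI).length : Int) - max 0 ((p.2 : Int) - (matrix.length : Int) + 4) ≤ (p.1.length : Int))
instance (matrix : List (List Int)) : Decidable (Pre_ascending_diagonal matrix) := by
  unfold Pre_ascending_diagonal; infer_instance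

def pvWitness_ascending_diagonal : List (List Int) :=
  [[1, 2, 3, 4], [5, 6, 7, 8], [9, 10, 11, 12], [13, 14, 15, 16]]

def Spec_ascending_diagonal (matrix : List (List Int)) (out : Int) : Prop := out = ascending_diagonal_alt matrix
instance (matrix : List (List Int)) (out : Int) : Decidable (Spec_ascending_diagonal matrix out) := by unfold Spec_ascending_diagonal; infer_instance

-- ===== CLAIM (what is proved, stated in full; the proofs are below) =====
def Claim_equal_ascending_diagonal : Prop := ∀ (matrix : List (List Int)), Dom_ascending_diagonal matrix → Pre_ascending_diagonal matrix → Spec_ascending_diagonal matrix (ascending_diagonal matrix)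

-- ===== LEMMAS AND PROOFS =====
-- Plan: both ports are running maxima (seeded 0) over a list of 4-cell diagonal products —
-- A over the list indexed by (row, col), B over the list indexed by (diagonal start, offset).
-- Under Pre_ the two lists have the same elements (mem_iff: Pre_ guarantees B's walk reaches
-- every window A multiplies), and a running max only depends on the set of elements
-- (foldl_max_eq_of_mem_iff).

def pvProd (m : List (List Int)) (row col : Int) : Int :=
  pvGet m row col * pvGet m (row + 1) (col - 1) * pvGet m (row + 2) (col - 2) * pvGet m (row + 3) (col - 3)

theorem pvDiag_eq (m : List (List Int)) (h r c : Int) :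
    pvDiag m h r c =
      if r < h ∧ 0 ≤ c ∧ c < ((PySem.List.pyGetD m r []).length : Int) then
        pvGet m r c :: pvDiag m h (r + 1) (c - 1)
      else [] := by
  unfold pvDiag
  rcases hn : (h - r).toNat with _ | n
  · rw [pvDiagAux]
    rw [if_neg (by omega)]
  · rw [pvDiagAux]
    split
    · next hc =>
      have : n = (h - (r + 1)).toNat := by omega
      rw [this]
    · rfl

theorem pvDiag_get (m : List (List Int)) (h r c i : Int) (h0 : 0 ≤ i)
    (hl : i < ((pvDiag m h r c).length : Int)) :
    PySem.List.pyGetD (pvDiag m h r c) i 0 = pvGet m (r + i) (c - i) := by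
  by_cases hc : r < h ∧ 0 ≤ c ∧ c < ((PySem.List.pyGetD m r []).length : Int)
  · rw [pvDiag_eq, if_pos hc] at hl ⊢
    rcases eq_or_lt_of_le h0 with h0' | h0'
    · rw [← h0']
      simp [PySem.List.pyGetD_zero_cons]
    · rw [PySem.List.pyGetD_of_nonneg _ _ h0]
      have hnat : i.toNat = (i - 1).toNat + 1 := by omega
      rw [hnat, List.getD_cons_succ, ← PySem.List.pyGetD_of_nonneg _ _ (by omega : (0:Int) ≤ i - 1)]
      rw [pvDiag_get m h (r + 1) (c - 1) (i - 1) (by omega)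
        (by simp only [List.length_cons] at hl; push_cast at hl ⊢; omega)]
      ring_nf
  · rw [pvDiag_eq, if_neg hc] at hl
    simp at hl
    omega
termination_by (h - r).toNat
decreasing_by omega

theorem pvDiag_bounds (m : List (List Int)) (h r c i : Int) (h0 : 0 ≤ i)
    (hl : i < ((pvDiag m h r c).length : Int)) :
    r + i < h ∧ 0 ≤ c - i := by
  by_cases hc : r < h ∧ 0 ≤ c ∧ c < ((PySem.List.pyGetD m r []).length : Int)
  · rcases eq_or_lt_of_le h0 with h0' | h0'
    · omega
    · rw [pvDiag_eq, if_pos hc] at hl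
      have := pvDiag_bounds m h (r + 1) (c - 1) (i - 1) (by omega)
        (by simp only [List.length_cons] at hl; push_cast at hl ⊢; omega)
      omega
  · rw [pvDiag_eq, if_neg hc] at hl
    simp at hl
    omega
termination_by (h - r).toNat
decreasing_by omega

theorem pvDiag_len_ge (m : List (List Int)) (h r c t : Int) (h0 : 0 ≤ t)
    (h1 : t < h - r) (h2 : t < c + 1)
    (hcells : ∀ j : Int, 0 ≤ j → j ≤ t → c - j < ((PySem.List.pyGetD m (r + j) []).length : Int)) :
    t < ((pvDiag m h r c).length : Int) := by
  have hc : r < h ∧ 0 ≤ c ∧ c < ((PySem.List.pyGetD m r []).length : Int) := by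
    refine ⟨by omega, by omega, ?_⟩
    have := hcells 0 le_rfl h0
    simpa using this
  rw [pvDiag_eq, if_pos hc]
  rcases eq_or_lt_of_le h0 with h0' | h0'
  · simp only [List.length_cons]
    push_cast
    omega
  · have := pvDiag_len_ge m h (r + 1) (c - 1) (t - 1) (by omega) (by omega) (by omega)
      (fun j hj0 hjt => by
        have hx := hcells (j + 1) (by omega) (by omega)
        have e : r + (j + 1) = r + 1 + j := by ring
        rw [e] at hx
        omega)
    simp only [List.length_cons]
    push_cast at this ⊢
    omega
termination_by (h - r).toNat
decreasing_by omega

def pvW (m : List (List Int)) : Int := ((PySem.List.pyGetD m 0 []).length : Int)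

theorem pvW_eq_headI (m : List (List Int)) (hm : m ≠ []) :
    pvW m = ((m.headI).length : Int) := by
  cases m with
  | nil => simp at hm
  | cons a t => simp [pvW, PySem.List.pyGetD_zero_cons]

theorem pre_row (m : List (List Int)) (hPre : Pre_ascending_diagonal m)
    (h4 : 4 ≤ (m.length : Int) ∧ 4 ≤ pvW m) (r : Int) (h0 : 0 ≤ r) (h1 : r < (m.length : Int)) :
    pvW m - max 0 (r - (m.length : Int) + 4) ≤ ((PySem.List.pyGetD m r []).length : Int) := by
  obtain ⟨hne, hrows⟩ := hPre
  rw [pvW_eq_headI m hne] at h4 ⊢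
  have hn : r.toNat < m.length := by omega
  have hmem : (m[r.toNat], r.toNat) ∈ m.zipIdx := by
    have : m.zipIdx[r.toNat]'(by simpa using hn) = (m[r.toNat], r.toNat) := by
      simp
    rw [← this]
    exact List.getElem_mem _
  have := hrows h4 _ hmem
  simp only at this
  have hg : PySem.List.pyGetD m r [] = m[r.toNat] := by
    rw [PySem.List.pyGetD_of_nonneg _ _ h0]
    exact List.getD_eq_getElem _ _ hn
  rw [hg]
  have e : (r.toNat : Int) = r := by omega
  rw [e] at this
  exact this

theorem if_gt_eq_max (b x : Int) : (if x > b then x else b) = max b x := by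
  split <;> omega

theorem foldl_max_eq_of_mem_iff (l₁ l₂ : List Int) (a : Int)
    (h : ∀ x, x ∈ l₁ ↔ x ∈ l₂) : l₁.foldl max a = l₂.foldl max a := by
  apply le_antisymm
  · rcases PySem.List.foldl_max_mem l₁ a with h1 | h1
    · rw [h1]; exact (PySem.List.le_foldl_max l₂ a).1
    · exact (PySem.List.le_foldl_max l₂ a).2 _ ((h _).1 h1)
  · rcases PySem.List.foldl_max_mem l₂ a with h1 | h1
    · rw [h1]; exact (PySem.List.le_foldl_max l₁ a).1
    · exact (PySem.List.le_foldl_max l₁ a).2 _ ((h _).2 h1)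

def pvLA (m : List (List Int)) : List Int :=
  (PySem.List.pyRange 0 ((m.length : Int) - 3) 1).flatMap (fun row =>
    (PySem.List.pyRange 3 (pvW m) 1).map (fun col => pvProd m row col))

def pvStarts (m : List (List Int)) : List (Int × Int) :=
  (PySem.List.pyRange 0 (pvW m) 1).map (fun c => ((0 : Int), c)) ++
  (PySem.List.pyRange 1 (m.length : Int) 1).map (fun r => (r, pvW m - 1))

def pvLB (m : List (List Int)) : List Int :=
  (pvStarts m).flatMap (fun rc =>
    (PySem.List.pyRange 0 (((pvDiag m (m.length : Int) rc.1 rc.2).length : Int) - 3) 1).map (fun i =>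
      PySem.List.pyGetD (pvDiag m (m.length : Int) rc.1 rc.2) i 0 *
      PySem.List.pyGetD (pvDiag m (m.length : Int) rc.1 rc.2) (i + 1) 0 *
      PySem.List.pyGetD (pvDiag m (m.length : Int) rc.1 rc.2) (i + 2) 0 *
      PySem.List.pyGetD (pvDiag m (m.length : Int) rc.1 rc.2) (i + 3) 0))

theorem A_eq_foldl (m : List (List Int)) :
    ascending_diagonal m = (pvLA m).foldl max 0 := by
  unfold ascending_diagonal pvLA pvW
  rw [List.foldl_flatMap]
  simp only [List.foldl_map, pvProd, if_gt_eq_max]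

theorem B_eq_foldl (m : List (List Int)) :
    ascending_diagonal_alt m = (pvLB m).foldl max 0 := by
  unfold ascending_diagonal_alt pvLB pvStarts pvW
  rw [List.foldl_flatMap]
  simp only [List.foldl_map, if_gt_eq_max]

theorem mem_pvLA (m : List (List Int)) (x : Int) :
    x ∈ pvLA m ↔ ∃ row col : Int, 0 ≤ row ∧ row < (m.length : Int) - 3 ∧
      3 ≤ col ∧ col < pvW m ∧ x = pvProd m row col := by
  simp only [pvLA, List.mem_flatMap, List.mem_map, PySem.List.mem_pyRange_one]
  constructor
  · rintro ⟨row, ⟨h1, h2⟩, col, ⟨h3, h4⟩, rfl⟩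
    exact ⟨row, col, h1, h2, h3, h4, rfl⟩
  · rintro ⟨row, col, h1, h2, h3, h4, rfl⟩
    exact ⟨row, ⟨h1, h2⟩, col, ⟨h3, h4⟩, rfl⟩

theorem window_eq_pvProd (m : List (List Int)) (r0 c0 i : Int) (h0 : 0 ≤ i)
    (h1 : i + 3 < ((pvDiag m (m.length : Int) r0 c0).length : Int)) :
    PySem.List.pyGetD (pvDiag m (m.length : Int) r0 c0) i 0 *
    PySem.List.pyGetD (pvDiag m (m.length : Int) r0 c0) (i + 1) 0 *
    PySem.List.pyGetD (pvDiag m (m.length : Int) r0 c0) (i + 2) 0 *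
    PySem.List.pyGetD (pvDiag m (m.length : Int) r0 c0) (i + 3) 0 =
    pvProd m (r0 + i) (c0 - i) := by
  rw [pvDiag_get m _ r0 c0 i h0 (by omega),
      pvDiag_get m _ r0 c0 (i + 1) (by omega) (by omega),
      pvDiag_get m _ r0 c0 (i + 2) (by omega) (by omega),
      pvDiag_get m _ r0 c0 (i + 3) (by omega) (by omega), pvProd]
  ring_nf

theorem mem_pvLB (m : List (List Int)) (x : Int) :
    x ∈ pvLB m ↔ ∃ r0 c0 i : Int,
      ((r0 = 0 ∧ 0 ≤ c0 ∧ c0 < pvW m) ∨ (1 ≤ r0 ∧ r0 < (m.length : Int) ∧ c0 = pvW m - 1)) ∧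
      0 ≤ i ∧ i + 3 < ((pvDiag m (m.length : Int) r0 c0).length : Int) ∧
      x = pvProd m (r0 + i) (c0 - i) := by
  simp only [pvLB, List.mem_flatMap, pvStarts, List.mem_append, List.mem_map,
    PySem.List.mem_pyRange_one]
  constructor
  · rintro ⟨⟨r0, c0⟩, hrc, i, ⟨hi0, hi1⟩, rfl⟩
    dsimp only at hi1 ⊢
    have hrc' : (r0 = 0 ∧ 0 ≤ c0 ∧ c0 < pvW m) ∨ (1 ≤ r0 ∧ r0 < (m.length : Int) ∧ c0 = pvW m - 1) := by
      rcases hrc with ⟨c, ⟨hc1, hc2⟩, he⟩ | ⟨r, ⟨hr1, hr2⟩, he⟩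
      · injection he with e1 e2; subst e1; subst e2; exact Or.inl ⟨rfl, hc1, hc2⟩
      · injection he with e1 e2; subst e1; subst e2; exact Or.inr ⟨hr1, hr2, rfl⟩
    refine ⟨r0, c0, i, hrc', hi0, by omega, ?_⟩
    rw [window_eq_pvProd m r0 c0 i hi0 (by omega)]
  · rintro ⟨r0, c0, i, hrc, hi0, hi1, rfl⟩
    refine ⟨(r0, c0), ?_, i, ⟨hi0, by dsimp only; omega⟩, ?_⟩
    · rcases hrc with ⟨e, h1, h2⟩ | ⟨h1, h2, e⟩
      · exact Or.inl ⟨c0, ⟨h1, h2⟩, by rw [e]⟩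
      · exact Or.inr ⟨r0, ⟨h1, h2⟩, by rw [e]⟩
    · dsimp only
      rw [window_eq_pvProd m r0 c0 i hi0 (by omega)]

theorem mem_iff (m : List (List Int)) (hPre : Pre_ascending_diagonal m) (x : Int) :
    x ∈ pvLA m ↔ x ∈ pvLB m := by
  rw [mem_pvLA, mem_pvLB]
  constructor
  · rintro ⟨row, col, h1, h2, h3, h4, rfl⟩
    have h4' : 4 ≤ (m.length : Int) ∧ 4 ≤ pvW m := ⟨by omega, by omega⟩
    -- choose the start of the diagonal through (row, col)
    by_cases hc : row ≤ pvW m - 1 - col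
    · -- start in the top row
      refine ⟨0, col + row, row, Or.inl ⟨rfl, by omega, by omega⟩, h1, ?_, ?_⟩
      · apply pvDiag_len_ge m _ 0 (col + row) (row + 3) (by omega) (by omega) (by omega)
        intro j hj0 hjt
        have hr := pre_row m hPre h4' (0 + j) (by omega) (by omega)
        omega
      · have e1 : (0 : Int) + row = row := by ring
        have e2 : col + row - row = col := by ring
        rw [e1, e2]
    · -- start in the rightmost column
      refine ⟨row - (pvW m - 1 - col), pvW m - 1, pvW m - 1 - col,
        Or.inr ⟨by omega, by omega, rfl⟩, by omega, ?_, ?_⟩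
      · apply pvDiag_len_ge m _ _ _ (pvW m - 1 - col + 3) (by omega) (by omega) (by omega)
        intro j hj0 hjt
        have hr := pre_row m hPre h4' (row - (pvW m - 1 - col) + j) (by omega) (by omega)
        omega
      · have e1 : row - (pvW m - 1 - col) + (pvW m - 1 - col) = row := by ring
        have e2 : pvW m - 1 - (pvW m - 1 - col) = col := by ring
        rw [e1, e2]
  · rintro ⟨r0, c0, i, hrc, hi0, hi1, rfl⟩
    have hb := pvDiag_bounds m (m.length : Int) r0 c0 (i + 3) (by omega) hi1
    refine ⟨r0 + i, c0 - i, ?_, by omega, by omega, ?_, rfl⟩ <;>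
      rcases hrc with ⟨e, ha, hb'⟩ | ⟨ha, hb', e⟩ <;> omega

theorem ascending_diagonal_total_eq (m : List (List Int)) (hPre : Pre_ascending_diagonal m) :
    ascending_diagonal m = ascending_diagonal_alt m := by
  rw [A_eq_foldl, B_eq_foldl]
  exact foldl_max_eq_of_mem_iff _ _ _ (mem_iff m hPre)

-- ===== VERDICT (by name: the statement is the Claim_ definition above) =====
theorem ascending_diagonal_spec : Claim_equal_ascending_diagonal := by
  intro matrix _ hPre
  exact ascending_diagonal_total_eq matrix hPre
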